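-- pv_equiv track=rewrite | github.com/grantcary/adventofcode2024 | day5/part1.py | validate_pages
-- ===== SOURCE A (Python) =====
-- def validate_pages(pages, before, after):
--     for e, page in enumerate(pages):
--         pre, post = pages[:e], pages[e+1:]
--         if pre and (page in before):
--             for x in pre:
--                 if x not in before[page]:
--                     return False
--         if post and (page in after):
--             for x in post:
--                 if x not in after[page]:
--                     return False
--     return True
-- ===== SOURCE B (Python) =====
-- def validate_pages(pages, before, after):
--     befset = {k: set(v) for k, v in before.items()}
--     aftset = {k: set(v) for k, v in after.items()}
--     seen = set()
--     for page in pages: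
--         if page in befset and not seen <= befset[page]:
--             return False
--         seen.add(page)
--     seen = set()
--     for page in reversed(pages):
--         if page in aftset and not seen <= aftset[page]:
--             return False
--         seen.add(page)
--     return True
-- ===== Notes on version B (the rewrite author's own statement) =====
-- stated objective: faster
-- what changed: B precomputes one set per rule key and replaces A's per-element pre/post slice scans by a forward and a backward linear pass that maintain a cumulative set of distinct pages seen and do one subset test per element, instead of scanning every earlier/later page per position.
import Mathlib
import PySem

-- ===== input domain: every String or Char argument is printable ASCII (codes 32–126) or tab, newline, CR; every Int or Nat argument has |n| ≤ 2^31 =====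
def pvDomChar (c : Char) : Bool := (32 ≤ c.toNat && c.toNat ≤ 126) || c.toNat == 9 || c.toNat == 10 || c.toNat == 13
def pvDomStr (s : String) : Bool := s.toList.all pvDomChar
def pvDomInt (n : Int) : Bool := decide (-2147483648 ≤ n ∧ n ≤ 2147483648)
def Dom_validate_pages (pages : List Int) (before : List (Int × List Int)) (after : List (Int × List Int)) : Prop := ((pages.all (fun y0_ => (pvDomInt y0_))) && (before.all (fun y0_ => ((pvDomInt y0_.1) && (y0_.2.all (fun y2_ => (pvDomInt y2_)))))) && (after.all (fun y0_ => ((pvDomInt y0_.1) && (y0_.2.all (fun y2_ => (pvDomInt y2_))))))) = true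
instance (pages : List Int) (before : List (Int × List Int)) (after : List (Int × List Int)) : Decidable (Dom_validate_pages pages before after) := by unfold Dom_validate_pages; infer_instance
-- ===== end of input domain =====

-- ===== PORT A =====
-- B replaces A's per-element pre/post slice scans by two linear passes that keep a cumulative set
-- of distinct pages seen and test it for inclusion in a precomputed set per rule key (objective: faster).
-- Neither version observably mutates its arguments.

-- dict primitives, exact: Python dict membership / d[k] = first matching key in the association list
def vpDictContains (d : List (Int × List Int)) (k : Int) : Bool :=
  match d with
  | [] => false
  | (k', _) :: rest => k' == k || vpDictContains rest k

def vpDictGet (d : List (Int × List Int)) (k : Int) : List Int :=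
  match d with
  | [] => []               -- unreachable in both ports: every call is guarded by vpDictContains
  | (k', v) :: rest => if k' == k then v else vpDictGet rest k

-- inner 'for x in xs: if x not in allowed: return False' loop of A
def vpAllIn (xs allowed : List Int) : Bool :=
  match xs with
  | [] => true
  | x :: r => if !(allowed.contains x) then false else vpAllIn r allowed

-- 'for e, page in enumerate(pages)' with early returns flattened into the two failure branches
def vpLoopA (pages : List Int) (before after : List (Int × List Int)) : List (Int × Int) → Bool
  | [] => true
  | (e, page) :: rest =>
    let pre := PySem.List.slice pages none (some e)
    let post := PySem.List.slice pages (some (e + 1)) none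
    if (!pre.isEmpty && vpDictContains before page) && !(vpAllIn pre (vpDictGet before page)) then
      false
    else if (!post.isEmpty && vpDictContains after page) && !(vpAllIn post (vpDictGet after page)) then
      false
    else vpLoopA pages before after rest

def validate_pages (pages : List Int) (before : List (Int × List Int)) (after : List (Int × List Int)) : Bool :=
  vpLoopA pages before after (PySem.List.enumerate pages 0)

-- ===== PORT B =====
-- '{k: set(v) for k, v in d.items()}' of Source B (a PySem.Set is the distinct-element list)
def vpSetVals (d : List (Int × List Int)) : List (Int × List Int) :=
  d.map (fun kv => (kv.1, PySem.Set.ofList kv.2))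

-- one pass of Source B: 'for page in …: if page in d and not seen <= d[page]: return False; seen.add(page)'
def vpPass (d : List (Int × List Int)) (seen : PySem.Set Int) : List Int → Bool
  | [] => true
  | page :: rest =>
    if vpDictContains d page && !(PySem.Set.issubset seen (vpDictGet d page)) then false
    else vpPass d (PySem.Set.add seen page) rest

def validate_pages_alt (pages : List Int) (before : List (Int × List Int)) (after : List (Int × List Int)) : Bool :=
  let befset := vpSetVals before
  let aftset := vpSetVals after
  if !(vpPass befset PySem.Set.empty pages) then false
  else vpPass aftset PySem.Set.empty pages.reverse

-- ===== PRECONDITION & SPEC =====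
def Spec_validate_pages (pages : List Int) (before : List (Int × List Int)) (after : List (Int × List Int)) (out : Bool) : Prop := out = validate_pages_alt pages before after
instance (pages : List Int) (before : List (Int × List Int)) (after : List (Int × List Int)) (out : Bool) : Decidable (Spec_validate_pages pages before after out) := by unfold Spec_validate_pages; infer_instance

-- ===== CLAIM (what is proved, stated in full; the proofs are below) =====
def Claim_equal_validate_pages : Prop := ∀ (pages : List Int) (before : List (Int × List Int)) (after : List (Int × List Int)), Dom_validate_pages pages before after → Spec_validate_pages pages before after (validate_pages pages before after)

-- ===== LEMMAS AND PROOFS =====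

-- the two directional per-pair conditions (a strictly earlier than b in pages)
def vpQpre (bf : List (Int × List Int)) (a b : Int) : Bool :=
  !(vpDictContains bf b) || (vpDictGet bf b).contains a

def vpQ (bf af : List (Int × List Int)) (a b : Int) : Bool :=
  vpQpre bf a b && vpQpre af b a

-- Bool-valued 'Q holds for every pair in order'
def vpPW (Q : Int → Int → Bool) : List Int → Bool
  | [] => true
  | a :: r => r.all (Q a) && vpPW Q r

-- pre-checks of the elements of todo against an already-processed front
def vpCross (bf : List (Int × List Int)) (front todo : List Int) : Bool :=
  todo.all (fun p => !(vpDictContains bf p) || front.all (fun x => (vpDictGet bf p).contains x))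

theorem vpAllIn_eq (xs allowed : List Int) :
    vpAllIn xs allowed = xs.all (fun x => allowed.contains x) := by
  induction xs with
  | nil => rfl
  | cons x r ih =>
    simp only [vpAllIn, List.all_cons, ih]
    cases allowed.contains x <;> simp

theorem vpAllAnd (l : List Int) (p q : Int → Bool) :
    l.all (fun x => p x && q x) = (l.all p && l.all q) := by
  induction l with
  | nil => rfl
  | cons x r ih =>
    simp only [List.all_cons, ih]
    cases p x <;> cases q x <;> cases r.all p <;> cases r.all q <;> rfl

theorem vpAllConstOr (l : List Int) (c : Bool) (f : Int → Bool) :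
    l.all (fun x => c || f x) = (c || l.all f) := by
  cases c <;> simp

theorem vpCross_append (bf : List (Int × List Int)) (front t : List Int) (p : Int) :
    vpCross bf (front ++ [p]) t =
      (vpCross bf front t && t.all (fun q => !(vpDictContains bf q) || (vpDictGet bf q).contains p)) := by
  induction t with
  | nil => rfl
  | cons q r ih =>
    simp only [vpCross, List.all_cons] at ih ⊢
    rw [ih]
    cases h1 : vpDictContains bf q <;>
      cases h2 : front.all (fun x => (vpDictGet bf q).contains x) <;>
      cases h3 : (vpDictGet bf q).contains p <;>
      cases h4 : r.all (fun s => !(vpDictContains bf s) || front.all fun x => (vpDictGet bf s).contains x) <;>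
      cases h5 : r.all (fun s => !(vpDictContains bf s) || (vpDictGet bf s).contains p) <;>
      simp_all [List.all_append]

theorem vpDropSucc (p : Int) (t : List Int) :
    ∀ front : List Int, (front ++ p :: t).drop (front.length + 1) = t := by
  intro front
  induction front with
  | nil => simp
  | cons x r ih => simp [ih]

-- the two flattened early-return branches of one A-iteration, as one Bool identity
theorem vpIf2 (g1 c1 a1 g2 c2 a2 r : Bool) (h1 : g1 = false → a1 = true)
    (h2 : g2 = false → a2 = true) :
    (if (g1 && c1) && !a1 then false else if (g2 && c2) && !a2 then false else r)
      = (((!c1 || a1) && (!c2 || a2)) && r) := by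
  cases g1 <;> cases c1 <;> cases a1 <;> cases g2 <;> cases c2 <;> cases a2 <;> cases r <;>
    simp_all

set_option maxHeartbeats 1000000 in
theorem vpLoopA_eq (bf af : List (Int × List Int)) (todo : List Int) :
    ∀ front : List Int,
      vpLoopA (front ++ todo) bf af (PySem.List.enumerate todo (front.length : Int)) =
        (vpCross bf front todo && vpPW (vpQ bf af) todo) := by
  induction todo with
  | nil => intro front; simp [vpLoopA, vpCross, vpPW, PySem.List.enumerate]
  | cons p t ih =>
    intro front
    rw [PySem.List.enumerate_cons]
    simp only [vpLoopA]
    rw [PySem.List.slice_to_natCast, List.take_left]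
    have hc : ((front.length : Int) + 1) = ((front.length + 1 : Nat) : Int) := by push_cast; ring
    rw [hc, PySem.List.slice_from_natCast, vpDropSucc]
    have hrec : vpLoopA (front ++ p :: t) bf af (PySem.List.enumerate t ((front.length + 1 : Nat) : Int)) =
        (vpCross bf (front ++ [p]) t && vpPW (vpQ bf af) t) := by
      have h1 : front ++ p :: t = (front ++ [p]) ++ t := by simp
      have h2 : (front.length + 1 : Nat) = (front ++ [p]).length := by simp
      rw [h1, h2, ih]
    rw [hrec]
    have hg1 : (!front.isEmpty) = false → vpAllIn front (vpDictGet bf p) = true := by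
      intro h
      simp only [Bool.not_eq_false', List.isEmpty_iff] at h
      subst h; rfl
    have hg2 : (!t.isEmpty) = false → vpAllIn t (vpDictGet af p) = true := by
      intro h
      simp only [Bool.not_eq_false', List.isEmpty_iff] at h
      subst h; rfl
    rw [vpIf2 (!front.isEmpty) (vpDictContains bf p) (vpAllIn front (vpDictGet bf p))
        (!t.isEmpty) (vpDictContains af p) (vpAllIn t (vpDictGet af p))
        (vpCross bf (front ++ [p]) t && vpPW (vpQ bf af) t) hg1 hg2]
    rw [vpCross_append]
    have hq : t.all (vpQ bf af p) =
        (t.all (fun q => !(vpDictContains bf q) || (vpDictGet bf q).contains p) &&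
          (!(vpDictContains af p) || t.all (fun y => (vpDictGet af p).contains y))) := by
      unfold vpQ vpQpre
      rw [vpAllAnd, vpAllConstOr]
    simp only [vpPW, hq]
    simp only [vpCross, List.all_cons, vpAllIn_eq]
    cases vpDictContains bf p <;> cases vpDictContains af p <;>
      cases h1 : front.all (fun x => (vpDictGet bf p).contains x) <;>
      cases h2 : t.all (fun y => (vpDictGet af p).contains y) <;>
      cases h3 : t.all (fun q => !(vpDictContains bf q) || (vpDictGet bf q).contains p) <;>
      cases h4 : t.all (fun q => !(vpDictContains bf q) || front.all (fun x => (vpDictGet bf q).contains x)) <;>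
      cases vpPW (vpQ bf af) t <;> rfl

-- the dict-of-sets comprehension preserves keys and turns each value into its distinct-element list
theorem vpSetVals_contains (d : List (Int × List Int)) (k : Int) :
    vpDictContains (vpSetVals d) k = vpDictContains d k := by
  induction d with
  | nil => rfl
  | cons kv rest ih =>
    simp only [vpSetVals] at ih ⊢
    simp only [List.map_cons, vpDictContains, ih]

theorem vpSetVals_get (d : List (Int × List Int)) (k : Int) :
    vpDictGet (vpSetVals d) k = PySem.Set.ofList (vpDictGet d k) := by
  induction d with
  | nil => rfl
  | cons kv rest ih =>
    simp only [vpSetVals] at ih ⊢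
    simp only [List.map_cons, vpDictGet]
    split_ifs <;> first | rfl | exact ih

theorem vpAllSetAdd (s : PySem.Set Int) (p : Int) (f : Int → Bool) :
    (PySem.Set.add s p).all f = (s.all f && f p) := by
  rw [PySem.Set.add_eq_ite]
  split_ifs with h
  · cases hf : s.all f
    · simp
    · have : f p = true := (List.all_eq_true.mp hf) p h
      simp [this]
  · simp [List.all_append]

theorem vpSubset_eq_all (s : PySem.Set Int) (v : List Int) :
    PySem.Set.issubset s (PySem.Set.ofList v) = s.all (fun x => v.contains x) := by
  rw [Bool.eq_iff_iff]
  simp [PySem.Set.issubset_iff, List.all_eq_true, PySem.Set.mem_ofList]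

theorem vpPassStep (c sub x : Bool) :
    (if c && !sub then false else x) = ((!c || sub) && x) := by
  cases c <;> cases sub <;> cases x <;> rfl

set_option maxHeartbeats 1000000 in
theorem vpPass_eq (bf : List (Int × List Int)) (l : List Int) :
    ∀ s : PySem.Set Int,
      vpPass (vpSetVals bf) s l =
        (l.all (fun p => s.all (fun x => vpQpre bf x p)) && vpPW (fun a b => vpQpre bf a b) l) := by
  induction l with
  | nil => intro s; simp [vpPass, vpPW]
  | cons p t ih =>
    intro s
    simp only [vpPass, vpSetVals_contains, vpSetVals_get, vpSubset_eq_all]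
    rw [vpPassStep, ih]
    have hhead : (!(vpDictContains bf p) || s.all (fun x => (vpDictGet bf p).contains x)) =
        s.all (fun x => vpQpre bf x p) := by
      unfold vpQpre
      rw [vpAllConstOr]
    rw [hhead]
    have hadd : t.all (fun q => (PySem.Set.add s p).all (fun x => vpQpre bf x q)) =
        (t.all (fun q => s.all (fun x => vpQpre bf x q)) && t.all (fun q => vpQpre bf p q)) := by
      rw [← vpAllAnd]
      simp only [vpAllSetAdd]
    rw [hadd]
    simp only [vpPW, List.all_cons]
    cases h1 : s.all (fun x => vpQpre bf x p) <;>
      cases h2 : t.all (fun q => s.all (fun x => vpQpre bf x q)) <;>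
      cases h3 : t.all (fun q => vpQpre bf p q) <;>
      cases vpPW (fun a b => vpQpre bf a b) t <;> rfl

theorem vpPW_append (Q : Int → Int → Bool) (a : Int) :
    ∀ xs : List Int, vpPW Q (xs ++ [a]) = (vpPW Q xs && xs.all (fun x => Q x a)) := by
  intro xs
  induction xs with
  | nil => simp [vpPW]
  | cons x r ih =>
    simp only [List.cons_append, vpPW, ih, List.all_append, List.all_cons, List.all_nil,
      Bool.and_true]
    cases h1 : r.all (Q x) <;> cases h2 : Q x a <;> cases h3 : vpPW Q r <;>
      cases h4 : r.all (fun y => Q y a) <;> rfl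

theorem vpPW_reverse (Q : Int → Int → Bool) (l : List Int) :
    vpPW Q l.reverse = vpPW (fun a b => Q b a) l := by
  induction l with
  | nil => rfl
  | cons a r ih =>
    simp only [List.reverse_cons, vpPW_append, ih, vpPW, List.all_reverse]
    cases vpPW (fun a b => Q b a) r <;> cases r.all (fun x => Q x a) <;> rfl

theorem vpPW_split (Q1 Q2 : Int → Int → Bool) (l : List Int) :
    vpPW (fun a b => Q1 a b && Q2 a b) l = (vpPW Q1 l && vpPW Q2 l) := by
  induction l with
  | nil => rfl
  | cons a r ih =>
    simp only [vpPW, ih, vpAllAnd]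
    cases r.all (Q1 a) <;> cases r.all (Q2 a) <;> cases vpPW Q1 r <;> cases vpPW Q2 r <;> rfl

-- ===== VERDICT (by name: the statement is the Claim_ definition above) =====
theorem validate_pages_spec : Claim_equal_validate_pages := by
  intro pages bf af _
  unfold Spec_validate_pages validate_pages validate_pages_alt
  have hA := vpLoopA_eq bf af pages []
  simp only [List.nil_append, List.length_nil, Nat.cast_zero] at hA
  rw [hA]
  have hcross : vpCross bf [] pages = true := by simp [vpCross]
  rw [hcross, Bool.true_and]
  have h1 : vpPass (vpSetVals bf) PySem.Set.empty pages = vpPW (fun a b => vpQpre bf a b) pages := by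
    rw [vpPass_eq]
    simp [PySem.Set.empty]
  have h2 : vpPass (vpSetVals af) PySem.Set.empty pages.reverse =
      vpPW (fun a b => vpQpre af b a) pages := by
    rw [vpPass_eq]
    simp only [PySem.Set.empty]
    rw [vpPW_reverse]
    simp
  simp only [h1, h2]
  have hsplit := vpPW_split (fun a b => vpQpre bf a b) (fun a b => vpQpre af b a) pages
  have hQ : vpPW (vpQ bf af) pages =
      (vpPW (fun a b => vpQpre bf a b) pages && vpPW (fun a b => vpQpre af b a) pages) := by
    rw [← hsplit]
    rfl
  rw [hQ]
  cases vpPW (fun a b => vpQpre bf a b) pages <;>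
    cases vpPW (fun a b => vpQpre af b a) pages <;> rfl
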